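-- pv_equiv track=rewrite | github.com/victorgabillon/chipiron | src/chipiron/environments/morpion/bootstrap/pv_family_targets.py | principal_variation_families_from_selected_child
-- ===== SOURCE A (Python) =====
-- def principal_variation_families_from_selected_child(
--     selected_child_by_node: dict[str, str | None],
-- ) -> dict[str, tuple[str, ...]]:
--     """Group nodes by the representative reached by following selected children."""
--     known_node_ids = set(selected_child_by_node)
--     known_node_ids.update(
--         child_id
--         for child_id in selected_child_by_node.values()
--         if child_id is not None
--     )
--     families: dict[str, list[str]] = {}
--     for node_id in sorted(known_node_ids):
--         representative = _principal_variation_representative(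
--             node_id,
--             selected_child_by_node,
--         )
--         families.setdefault(representative, []).append(node_id)
--     return {
--         representative: tuple(node_ids)
--         for representative, node_ids in families.items()
--     }
--
-- def _principal_variation_representative(
--     node_id: str,
--     selected_child_by_node: dict[str, str | None],
-- ) -> str:
--     """Return the final node reached by following selected-child links."""
--     seen: set[str] = set()
--     current_id = node_id
--     while True:
--         if current_id in seen:
--             raise ValueError(  # noqa: TRY003
--                 "Principal-variation family traversal found a cycle."
--             )
--         seen.add(current_id)
--         next_id = selected_child_by_node.get(current_id)
--         if next_id is None:
--             return current_id
--         current_id = next_id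
-- ===== SOURCE B (Python) =====
-- def principal_variation_families_from_selected_child(
--     selected_child_by_node: dict[str, str | None],
-- ) -> dict[str, tuple[str, ...]]:
--     """Group nodes by the representative reached by following selected children,
--     computed bottom-up: terminals seed a representative table and repeated
--     relaxation passes over the edge list propagate representatives to parents."""
--     known = set(selected_child_by_node)
--     known.update(
--         child_id
--         for child_id in selected_child_by_node.values()
--         if child_id is not None
--     )
--     rep = {n: n for n in known if selected_child_by_node.get(n) is None}
--     for _ in range(len(selected_child_by_node)):
--         for parent, child in selected_child_by_node.items():
--             if parent not in rep and child in rep: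
--                 rep[parent] = rep[child]
--     order = sorted(known)
--     rep_seq = [rep[n] for n in order]
--     return {
--         r: tuple(n for n, rn in zip(order, rep_seq) if rn == r)
--         for r in dict.fromkeys(rep_seq)
--     }
-- ===== Notes on version B (the rewrite author's own statement) =====
-- stated objective: alternative
-- what changed: A walks each node's selected-child chain top-down with a fresh 'seen' set and groups via dict.setdefault; B computes representatives bottom-up by dynamic programming (terminals seed a table, n relaxation passes over the edge list propagate representatives to parents) and groups via dict.fromkeys + a filtering comprehension.
import Mathlib
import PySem

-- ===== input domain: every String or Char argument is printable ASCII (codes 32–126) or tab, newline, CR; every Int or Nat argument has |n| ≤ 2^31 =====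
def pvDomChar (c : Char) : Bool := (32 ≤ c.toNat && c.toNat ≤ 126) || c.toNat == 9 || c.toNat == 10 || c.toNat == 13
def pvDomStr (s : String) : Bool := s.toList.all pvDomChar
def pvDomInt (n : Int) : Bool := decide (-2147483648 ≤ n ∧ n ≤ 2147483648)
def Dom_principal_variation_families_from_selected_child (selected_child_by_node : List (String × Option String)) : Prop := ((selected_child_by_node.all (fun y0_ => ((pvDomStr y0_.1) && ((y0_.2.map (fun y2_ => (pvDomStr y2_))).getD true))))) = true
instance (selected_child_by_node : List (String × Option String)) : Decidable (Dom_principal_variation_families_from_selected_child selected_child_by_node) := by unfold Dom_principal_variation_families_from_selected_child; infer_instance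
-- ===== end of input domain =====

-- B replaces A's per-node chain walk (seen-set while loop + setdefault grouping) by a bottom-up
-- dynamic program: terminals seed a representative table, n relaxation passes over the edge list
-- propagate representatives to parents, and grouping is dedup + filter (alternative algorithm).


-- ===== PORT A =====
-- _principal_variation_representative: while-loop with a 'seen' set; 'none' = the ValueError on a cycle.
-- fuel d.size+2 is an upper bound on the loop's iterations before return/raise (never exhausted).
def pvRepA (d : PySem.Dict String (Option String)) (seen : PySem.Set String) (cur : String) : Nat → Option String
  | 0 => none
  | fuel+1 =>
    if PySem.Set.contains seen cur then none
    else
      match (PySem.Dict.get? d cur).getD none with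
      | none => some cur
      | some nxt => pvRepA d (PySem.Set.add seen cur) nxt fuel

def principal_variation_families_from_selected_child (selected_child_by_node : List (String × Option String)) : List (String × List String) :=
  let d := PySem.Dict.ofList selected_child_by_node
  let known : PySem.Set String :=
    PySem.Set.update (PySem.Set.ofList (PySem.Dict.keys d)) ((PySem.Dict.values d).filterMap id)
  let families := (PySem.List.sorted known (fun x => x) false).foldl
      (fun fam node =>
        match pvRepA d PySem.Set.empty node (PySem.Dict.size d + 2) with
        | some rep => PySem.Dict.modify fam rep [] (fun v => v ++ [node])
        | none => fam)
      PySem.Dict.empty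
  PySem.Dict.items families

-- ===== PORT B =====
-- one relaxation step over one edge (parent, child): 'if parent not in rep and child in rep:
-- rep[parent] = rep[child]' (the 'None in rep' test is False, hence the match).
def pvRelax (r : PySem.Dict String String) (pc : String × Option String) : PySem.Dict String String :=
  if PySem.Dict.contains r pc.1 then r
  else
    match pc.2 with
    | none => r
    | some c => if PySem.Dict.contains r c then PySem.Dict.insert r pc.1 (PySem.Dict.getD r c "") else r

def principal_variation_families_from_selected_child_alt (selected_child_by_node : List (String × Option String)) : List (String × List String) :=
  let d := PySem.Dict.ofList selected_child_by_node
  let known : PySem.Set String :=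
    PySem.Set.update (PySem.Set.ofList (PySem.Dict.keys d)) ((PySem.Dict.values d).filterMap id)
  -- rep = {n: n for n in known if d.get(n) is None}  (rep is only ever looked up, never iterated)
  let rep0 := (known.filter (fun n => ((PySem.Dict.get? d n).getD none).isNone)).foldl
      (fun r n => PySem.Dict.insert r n n) PySem.Dict.empty
  -- for _ in range(len(d)): for parent, child in d.items(): relax
  let rep := (List.range (PySem.Dict.size d)).foldl
      (fun r _ => (PySem.Dict.items d).foldl pvRelax r) rep0
  let order := PySem.List.sorted known (fun x => x) false
  let repSeq := order.map (fun n => PySem.Dict.getD rep n "")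
  -- {r: tuple(n for n, rn in zip(order, rep_seq) if rn == r) for r in dict.fromkeys(rep_seq)}
  (PySem.List.dedup repSeq).map
    (fun r0 => (r0, ((order.zip repSeq).filter (fun p => p.2 == r0)).map (fun p => p.1)))

-- ===== PRECONDITION & SPEC =====
-- one selected-child step: none once the chain has ended or the node has no (non-None) child
def pvStep (d : PySem.Dict String (Option String)) : Option String → Option String
  | none => none
  | some s => (PySem.Dict.get? d s).getD none

-- Pre_ excludes exactly the cyclic inputs, on which Python A raises ValueError (and B KeyError):
-- acyclicity stated as "every selected-child chain dies out within size+1 steps".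
def Pre_principal_variation_families_from_selected_child (selected_child_by_node : List (String × Option String)) : Prop :=
  ∀ k ∈ PySem.Dict.keys (PySem.Dict.ofList selected_child_by_node),
    (pvStep (PySem.Dict.ofList selected_child_by_node))^[PySem.Dict.size (PySem.Dict.ofList selected_child_by_node) + 1] (some k) = none
instance (selected_child_by_node : List (String × Option String)) : Decidable (Pre_principal_variation_families_from_selected_child selected_child_by_node) := by unfold Pre_principal_variation_families_from_selected_child; infer_instance

def pvWitness_principal_variation_families_from_selected_child : (List (String × Option String)) :=
  [("a", some "b"), ("b", none), ("c", some "a")]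

def Spec_principal_variation_families_from_selected_child (selected_child_by_node : List (String × Option String)) (out : List (String × List String)) : Prop := out = principal_variation_families_from_selected_child_alt selected_child_by_node
instance (selected_child_by_node : List (String × Option String)) (out : List (String × List String)) : Decidable (Spec_principal_variation_families_from_selected_child selected_child_by_node out) := by unfold Spec_principal_variation_families_from_selected_child; infer_instance

-- ===== CLAIM (what is proved, stated in full; the proofs are below) =====
def Claim_equal_principal_variation_families_from_selected_child : Prop := ∀ (selected_child_by_node : List (String × Option String)), Dom_principal_variation_families_from_selected_child selected_child_by_node → Pre_principal_variation_families_from_selected_child selected_child_by_node → Spec_principal_variation_families_from_selected_child selected_child_by_node (principal_variation_families_from_selected_child selected_child_by_node)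

-- ===== LEMMAS AND PROOFS =====

-- canonical chain-following (proof-only reference function)
def pvChase (d : PySem.Dict String (Option String)) (cur : String) : Nat → Option String
  | 0 => none
  | f+1 =>
    match (PySem.Dict.get? d cur).getD none with
    | none => some cur
    | some nxt => pvChase d nxt f

-- the true representative relation
def pvRepRel (d : PySem.Dict String (Option String)) (k r : String) : Prop :=
  ∃ f, (pvStep d)^[f] (some k) = none ∧ pvChase d k f = some r

-- the value A computes at a node (proof-only)
def pvRepFun (d : PySem.Dict String (Option String)) (n : String) : String :=
  (pvRepA d PySem.Set.empty n (PySem.Dict.size d + 2)).getD ""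

-- every entry of a representative table is a true representative
def pvGoodD (d : PySem.Dict String (Option String)) (r : PySem.Dict String String) : Prop :=
  ∀ k v, PySem.Dict.get? r k = some v → pvRepRel d k v

theorem pvIterate_none (d : PySem.Dict String (Option String)) (f : Nat) :
    (pvStep d)^[f] none = none := by
  induction f with
  | zero => rfl
  | succ n ih => rw [Function.iterate_succ_apply, show pvStep d none = none from rfl, ih]

theorem pvIterate_mono (d : PySem.Dict String (Option String)) {f g : Nat} {x : Option String}
    (h : (pvStep d)^[f] x = none) (hfg : f ≤ g) : (pvStep d)^[g] x = none := by
  have : g = (g - f) + f := by omega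
  rw [this, Function.iterate_add_apply, h, pvIterate_none]

theorem pvChase_stable (d : PySem.Dict String (Option String)) :
    ∀ (f : Nat) (cur : String), (pvStep d)^[f] (some cur) = none →
      ∀ g, f ≤ g → pvChase d cur g = pvChase d cur f ∧ (pvChase d cur f).isSome := by
  intro f
  induction f with
  | zero => intro cur h; simp [Function.iterate_zero] at h
  | succ n ih =>
    intro cur h g hg
    obtain ⟨g', rfl⟩ : ∃ g', g = g' + 1 := ⟨g - 1, by omega⟩
    cases hstep : (PySem.Dict.get? d cur).getD none with
    | none => simp [pvChase, hstep]
    | some nxt =>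
      have hs : pvStep d (some cur) = some nxt := by simp [pvStep, hstep]
      rw [Function.iterate_succ_apply, hs] at h
      have := ih nxt h g' (by omega)
      simpa [pvChase, hstep] using this

theorem pvRepRel_unique (d : PySem.Dict String (Option String)) {k r r' : String}
    (h : pvRepRel d k r) (h' : pvRepRel d k r') : r = r' := by
  obtain ⟨f, hf, hc⟩ := h
  obtain ⟨f', hf', hc'⟩ := h'
  have h1 := (pvChase_stable d f k hf (max f f') (le_max_left _ _)).1
  have h2 := (pvChase_stable d f' k hf' (max f f') (le_max_right _ _)).1
  rw [hc] at h1; rw [hc'] at h2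
  have := h1.symm.trans h2
  simpa using this

theorem pvRepRel_shift1 (d : PySem.Dict String (Option String)) {p c : String}
    (hpc : (PySem.Dict.get? d p).getD none = some c) {r : String}
    (hr : pvRepRel d c r) : pvRepRel d p r := by
  obtain ⟨f, hf, hc⟩ := hr
  refine ⟨f + 1, ?_, ?_⟩
  · rw [Function.iterate_succ_apply, show pvStep d (some p) = some c from by simp [pvStep, hpc]]
    exact hf
  · simpa [pvChase, hpc] using hc

theorem pvNoCycle (d : PySem.Dict String (Option String)) {f : Nat} {cur : String}
    (h : (pvStep d)^[f] (some cur) = none) (j : Nat) :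
    (pvStep d)^[j + 1] (some cur) ≠ some cur := by
  intro hcyc
  have hper : ∀ m : Nat, (pvStep d)^[m * (j + 1)] (some cur) = some cur := by
    intro m
    induction m with
    | zero => simp
    | succ n ih =>
      have : (n + 1) * (j + 1) = n * (j + 1) + (j + 1) := by ring
      rw [this, Function.iterate_add_apply, hcyc, ih]
  have h1 := hper f
  have hle : f ≤ f * (j + 1) := by nlinarith
  have h2 := pvIterate_mono d h hle
  rw [h1] at h2
  exact absurd h2 (by simp)

theorem pvRepA_eq_chase (d : PySem.Dict String (Option String)) :
    ∀ (fuel : Nat) (cur : String) (seen : PySem.Set String) (f : Nat),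
      (pvStep d)^[f] (some cur) = none → f < fuel →
      (∀ t ∈ seen, ∀ j, (pvStep d)^[j] (some cur) ≠ some t) →
      pvRepA d seen cur fuel = pvChase d cur fuel := by
  intro fuel
  induction fuel with
  | zero => intro cur seen f _ hlt; omega
  | succ n ih =>
    intro cur seen f hterm hlt hseen
    have hnotin : cur ∉ seen := fun hm => hseen cur hm 0 (by simp)
    cases hstep : (PySem.Dict.get? d cur).getD none with
    | none => simp [pvRepA, pvChase, hstep, hnotin]
    | some nxt =>
      have hs : pvStep d (some cur) = some nxt := by simp [pvStep, hstep]
      obtain ⟨f', rfl⟩ : ∃ f', f = f' + 1 := by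
        rcases f with _ | f'
        · simp [Function.iterate_zero] at hterm
        · exact ⟨f', rfl⟩
      rw [Function.iterate_succ_apply, hs] at hterm
      have hseen' : ∀ t ∈ PySem.Set.add seen cur, ∀ j, (pvStep d)^[j] (some nxt) ≠ some t := by
        intro t ht j
        have hshift : (pvStep d)^[j] (some nxt) = (pvStep d)^[j + 1] (some cur) := by
          rw [Function.iterate_succ_apply, hs]
        rw [hshift]
        rcases (PySem.Set.mem_add seen cur t).mp ht with h1 | h1
        · exact hseen t h1 (j + 1)
        · rw [h1]
          exact pvNoCycle d (by rw [Function.iterate_succ_apply, hs]; exact hterm) j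
      have := ih nxt (PySem.Set.add seen cur) f' hterm (by omega) hseen'
      simpa [pvRepA, pvChase, hstep, hnotin] using this

-- A's chain walk returns exactly the true representative pvRepFun
theorem pvRepA_some (d : PySem.Dict String (Option String)) (n : String)
    (hterm : (pvStep d)^[PySem.Dict.size d + 1] (some n) = none) :
    pvRepA d PySem.Set.empty n (PySem.Dict.size d + 2) = some (pvRepFun d n) ∧
    pvRepRel d n (pvRepFun d n) := by
  have hA : pvRepA d PySem.Set.empty n (PySem.Dict.size d + 2)
      = pvChase d n (PySem.Dict.size d + 2) := by
    refine pvRepA_eq_chase d _ n _ (PySem.Dict.size d + 1) hterm (by omega) ?_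
    intro t ht
    simp [PySem.Set.empty] at ht
  have hst := pvChase_stable d (PySem.Dict.size d + 1) n hterm (PySem.Dict.size d + 2) (by omega)
  obtain ⟨r, hr⟩ := Option.isSome_iff_exists.mp hst.2
  have hv : pvRepA d PySem.Set.empty n (PySem.Dict.size d + 2) = some r := by
    rw [hA, hst.1, hr]
  have hfun : pvRepFun d n = r := by rw [pvRepFun, hv]; rfl
  exact ⟨by rw [hv, hfun], hfun ▸ ⟨PySem.Dict.size d + 1, hterm, hr⟩⟩

-- relaxation never touches an existing entry
theorem pvRelax_preserves (r : PySem.Dict String String) (pc : String × Option String)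
    {k : String} {v : String} (h : PySem.Dict.get? r k = some v) :
    PySem.Dict.get? (pvRelax r pc) k = some v := by
  unfold pvRelax
  split_ifs with h1
  · exact h
  · cases pc.2 with
    | none => exact h
    | some c =>
      simp only
      split_ifs with h2
      · have hne : k ≠ pc.1 := by
          intro he
          rw [PySem.Dict.contains_eq_isSome_get?, ← he, h] at h1
          simp at h1
        rw [PySem.Dict.get?_insert_of_ne _ _ hne]
        exact h
      · exact h

theorem pvRelax_fold_preserves (L : List (String × Option String)) :
    ∀ (r : PySem.Dict String String) {k v : String}, PySem.Dict.get? r k = some v →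
      PySem.Dict.get? (L.foldl pvRelax r) k = some v := by
  induction L with
  | nil => intro r k v h; exact h
  | cons q L' ih => intro r k v h; exact ih _ (pvRelax_preserves r q h)

theorem pvRelax_fold_contains (L : List (String × Option String))
    (r : PySem.Dict String String) {k : String}
    (h : PySem.Dict.contains r k = true) :
    PySem.Dict.contains (L.foldl pvRelax r) k = true := by
  rw [PySem.Dict.contains_eq_isSome_get?] at h
  obtain ⟨v, hv⟩ := Option.isSome_iff_exists.mp h
  rw [PySem.Dict.contains_eq_isSome_get?, pvRelax_fold_preserves L r hv]
  rfl

-- relaxation only adds true representatives (edges come from d)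
theorem pvRelax_good (d : PySem.Dict String (Option String)) (pc : String × Option String)
    (hpc : PySem.Dict.get? d pc.1 = some pc.2)
    (r : PySem.Dict String String) (hg : pvGoodD d r) : pvGoodD d (pvRelax r pc) := by
  unfold pvRelax
  split_ifs with h1
  · exact hg
  · cases hc : pc.2 with
    | none => exact hg
    | some c =>
      simp only
      split_ifs with h2
      · intro k v hk
        rw [PySem.Dict.contains_eq_isSome_get?] at h2
        obtain ⟨w, hw⟩ := Option.isSome_iff_exists.mp h2
        have hgetD : PySem.Dict.getD r c "" = w := PySem.Dict.getD_of_get?_eq_some _ _ hw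
        by_cases hkp : k = pc.1
        · subst hkp
          rw [PySem.Dict.get?_insert_self] at hk
          injection hk with hvw
          subst hvw
          rw [hgetD]
          exact pvRepRel_shift1 d (by rw [hpc, hc]; rfl) (hg c w hw)
        · rw [PySem.Dict.get?_insert_of_ne _ _ hkp] at hk
          exact hg k v hk
      · exact hg

theorem pvRelax_fold_good (d : PySem.Dict String (Option String)) :
    ∀ (L : List (String × Option String)), (∀ pc ∈ L, PySem.Dict.get? d pc.1 = some pc.2) →
      ∀ (r : PySem.Dict String String), pvGoodD d r → pvGoodD d (L.foldl pvRelax r) := by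
  intro L
  induction L with
  | nil => intro _ r hg; exact hg
  | cons q L' ih =>
    intro hL r hg
    exact ih (fun pc hpc => hL pc (List.mem_cons_of_mem _ hpc)) _
      (pvRelax_good d q (hL q (List.mem_cons_self ..)) r hg)

-- one pass over a list containing the edge (n, some c) sets n once c is set
theorem pvRelax_fold_sets (n c : String) :
    ∀ (L : List (String × Option String)) (r : PySem.Dict String String),
      (n, some c) ∈ L → PySem.Dict.contains r c = true →
      PySem.Dict.contains (L.foldl pvRelax r) n = true := by
  intro L
  induction L with
  | nil => intro r h; simp at h
  | cons q L' ih =>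
    intro r hmem hc
    rcases List.mem_cons.mp hmem with hq | hq
    · subst hq
      simp only [List.foldl_cons]
      apply pvRelax_fold_contains
      unfold pvRelax
      split_ifs with h1
      · exact h1
      · simp only
        rw [if_pos hc]
        exact PySem.Dict.contains_insert_self _ _ _
    · simp only [List.foldl_cons]
      refine ih _ hq ?_
      rw [PySem.Dict.contains_eq_isSome_get?] at hc ⊢
      obtain ⟨v, hv⟩ := Option.isSome_iff_exists.mp hc
      rw [pvRelax_preserves r q hv]
      rfl

-- foldl over range with a body ignoring the index is iteration
theorem pvFoldl_range_iterate {α : Type} (h : α → α) :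
    ∀ (n : Nat) (x : α), (List.range n).foldl (fun a _ => h a) x = h^[n] x := by
  intro n
  induction n with
  | zero => intro x; rfl
  | succ m ih =>
    intro x
    rw [List.range_succ, List.foldl_append, ih, Function.iterate_succ_apply']
    rfl

-- the initial table: exactly the terminals of knownL, each mapped to itself
theorem pvRep0_good (d : PySem.Dict String (Option String)) (xs : List String)
    (hxs : ∀ n ∈ xs, ((PySem.Dict.get? d n).getD none) = none) :
    pvGoodD d (xs.foldl (fun r n => PySem.Dict.insert r n n) PySem.Dict.empty) := by
  have main : ∀ (l : List String), (∀ n ∈ l, ((PySem.Dict.get? d n).getD none) = none) →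
      ∀ (r : PySem.Dict String String), pvGoodD d r →
      pvGoodD d (l.foldl (fun r n => PySem.Dict.insert r n n) r) := by
    intro l
    induction l with
    | nil => intro _ r hg; exact hg
    | cons q l' ih =>
      intro hl r hg
      refine ih (fun n hn => hl n (List.mem_cons_of_mem _ hn)) _ ?_
      intro k v hk
      by_cases hkq : k = q
      · subst hkq
        rw [PySem.Dict.get?_insert_self] at hk
        injection hk with hv
        subst hv
        refine ⟨1, ?_, ?_⟩
        · rw [Function.iterate_one, show pvStep d (some k) = none from by
            simp [pvStep, hl k (List.mem_cons_self ..)]]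
        · simp [pvChase, hl k (List.mem_cons_self ..)]
      · rw [PySem.Dict.get?_insert_of_ne _ _ hkq] at hk
        exact hg k v hk
  refine main xs hxs _ ?_
  intro k v hk
  rw [PySem.Dict.get?_empty] at hk
  cases hk

theorem pvRep0_contains (xs : List String) (n : String)
    (hn : n ∈ xs) :
    PySem.Dict.contains (xs.foldl (fun r n => PySem.Dict.insert r n n) PySem.Dict.empty) n = true := by
  rw [PySem.Dict.contains_iff_mem_keys, PySem.Dict.keys_foldl_insert]
  rw [PySem.Dict.keys_empty, PySem.Set.update_nil_left]
  exact (PySem.Set.mem_ofList _ _).mpr hn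

-- completeness of the relaxation: after i passes every node of knownL whose chain dies within
-- i+1 steps is in the table
theorem pvPasses_complete (d : PySem.Dict String (Option String)) (knownL : List String)
    (hval : ∀ c, some c ∈ PySem.Dict.values d → c ∈ knownL)
    (rep0 : PySem.Dict String String)
    (hterm0 : ∀ n ∈ knownL, ((PySem.Dict.get? d n).getD none) = none →
        PySem.Dict.contains rep0 n = true) :
    ∀ (i : Nat) (n : String) (f : Nat), n ∈ knownL → 1 ≤ f → f ≤ i + 1 →
      (pvStep d)^[f] (some n) = none →
      PySem.Dict.contains ((fun r => (PySem.Dict.items d).foldl pvRelax r)^[i] rep0) n = true := by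
  intro i
  induction i with
  | zero =>
    intro n f hn h1 h2 hterm
    obtain rfl : f = 1 := by omega
    rw [Function.iterate_one] at hterm
    exact hterm0 n hn (by simpa [pvStep] using hterm)
  | succ m ih =>
    intro n f hn h1 h2 hterm
    rw [Function.iterate_succ_apply']
    cases hstep : (PySem.Dict.get? d n).getD none with
    | none =>
      apply pvRelax_fold_contains
      exact ih n 1 hn (by omega) (by omega)
        (by rw [Function.iterate_one]; simpa [pvStep] using hstep)
    | some c =>
      have hs : pvStep d (some n) = some c := by simp [pvStep, hstep]
      obtain ⟨f', rfl⟩ : ∃ f', f = f' + 1 := ⟨f - 1, by omega⟩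
      rw [Function.iterate_succ_apply, hs] at hterm
      have hf1 : 1 ≤ f' := by
        by_contra h
        have : f' = 0 := by omega
        subst this
        simp [Function.iterate_zero] at hterm
      have hget : PySem.Dict.get? d n = some (some c) := by
        cases hg : PySem.Dict.get? d n with
        | none => rw [hg] at hstep; simp at hstep
        | some o => rw [hg] at hstep; simp at hstep; rw [hstep]
      have hcmem : c ∈ knownL := by
        apply hval
        have := PySem.Dict.mem_items_of_get?_eq_some _ hget
        exact List.mem_map_of_mem this
      have hcontc := ih c f' hcmem hf1 (by omega) hterm
      exact pvRelax_fold_sets n c _ _ (PySem.Dict.mem_items_of_get?_eq_some _ hget) hcontc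

-- grouping shapes --------------------------------------------------------

theorem pvFilter_map_fst {α : Type} (g : α → String) (k : String) (l : List α) :
    ((l.map (fun n => (g n, n))).filter (fun p => p.1 == k)).map (fun p => p.2)
      = l.filter (fun n => g n == k) := by
  induction l with
  | nil => rfl
  | cons x xs ih =>
    by_cases h : g x == k
    · simp [h, ih]
    · simp only [List.map_cons, List.filter_cons] at *
      simp [h, ih]

theorem pvFilter_map_snd {α : Type} (g : α → String) (k : String) (l : List α) :
    ((l.map (fun n => (n, g n))).filter (fun p => p.2 == k)).map (fun p => p.1)
      = l.filter (fun n => g n == k) := by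
  induction l with
  | nil => rfl
  | cons x xs ih =>
    by_cases h : g x == k
    · simp [h, ih]
    · simp only [List.map_cons, List.filter_cons] at *
      simp [h, ih]

theorem pvZip_map_self (g : String → String) (l : List String) :
    l.zip (l.map g) = l.map (fun n => (n, g n)) := by
  induction l with
  | nil => rfl
  | cons x xs ih => simp [ih]

-- ===== VERDICT (by name: the statement is the Claim_ definition above) =====
theorem principal_variation_families_from_selected_child_spec : Claim_equal_principal_variation_families_from_selected_child := by
  intro l _hdom hpre
  unfold Spec_principal_variation_families_from_selected_child
  unfold principal_variation_families_from_selected_child principal_variation_families_from_selected_child_alt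
  simp only []
  set d := PySem.Dict.ofList l with hd
  set known : PySem.Set String :=
    PySem.Set.update (PySem.Set.ofList (PySem.Dict.keys d)) ((PySem.Dict.values d).filterMap id) with hknown
  set order := PySem.List.sorted known (fun x => x) false with horder
  -- every known node's chain terminates within size+1 steps
  have hterm : ∀ n ∈ known, (pvStep d)^[PySem.Dict.size d + 1] (some n) = none := by
    intro n hn
    rcases (PySem.Set.mem_update _ _ _).mp hn with h1 | h1
    · exact hpre n ((PySem.Set.mem_ofList _ _).mp h1)
    · by_cases hk : n ∈ PySem.Dict.keys d
      · exact hpre n hk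
      · have hnone : PySem.Dict.get? d n = none :=
          (PySem.Dict.get?_eq_none_iff_not_mem_keys _ _).mpr hk
        refine pvIterate_mono d (f := 1) ?_ (by omega)
        simp [pvStep, hnone]
  have htermo : ∀ n ∈ order, (pvStep d)^[PySem.Dict.size d + 1] (some n) = none := by
    intro n hn
    exact hterm n ((PySem.List.mem_sorted _ _ _ _).mp hn)
  -- the A side: replace the chain walk by pvRepFun, then use the grouping lemmas
  have hAcongr : order.foldl
      (fun fam node =>
        match pvRepA d PySem.Set.empty node (PySem.Dict.size d + 2) with
        | some rep => PySem.Dict.modify fam rep [] (fun v => v ++ [node])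
        | none => fam) PySem.Dict.empty
      = order.foldl
        (fun fam node => PySem.Dict.modify fam (pvRepFun d node) [] (fun v => v ++ [node]))
        PySem.Dict.empty := by
    apply PySem.List.foldl_congr_mem
    intro acc x hx
    rw [(pvRepA_some d x (htermo x hx)).1]
  rw [hAcongr]
  -- B side: the computed table agrees with pvRepFun on every node of order
  have hnodupkeys : (PySem.Dict.keys d).Nodup := PySem.Dict.nodup_keys_ofList l
  have hval : ∀ c, some c ∈ PySem.Dict.values d → c ∈ (known : List String) := by
    intro c hc
    exact (PySem.Set.mem_update _ _ _).mpr (Or.inr (List.mem_filterMap.mpr ⟨some c, hc, rfl⟩))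
  have hitems : ∀ pc ∈ PySem.Dict.items d, PySem.Dict.get? d pc.1 = some pc.2 := by
    intro pc hpc
    obtain ⟨p1, p2⟩ := pc
    exact PySem.Dict.get?_of_mem_items d hpc hnodupkeys
  have hrepeq : ∀ n ∈ order,
      PySem.Dict.getD ((List.range (PySem.Dict.size d)).foldl
        (fun r _ => (PySem.Dict.items d).foldl pvRelax r)
        ((known.filter (fun n => ((PySem.Dict.get? d n).getD none).isNone)).foldl
          (fun r n => PySem.Dict.insert r n n) PySem.Dict.empty)) n ""
      = pvRepFun d n := by
    intro n hn
    have hnk : n ∈ known := (PySem.List.mem_sorted _ _ _ _).mp hn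
    rw [pvFoldl_range_iterate]
    set rep0 := (known.filter (fun n => ((PySem.Dict.get? d n).getD none).isNone)).foldl
        (fun r n => PySem.Dict.insert r n n) PySem.Dict.empty with hrep0
    have hcont : PySem.Dict.contains
        ((fun r => (PySem.Dict.items d).foldl pvRelax r)^[PySem.Dict.size d] rep0) n = true := by
      refine pvPasses_complete d known ?_ rep0 ?_ (PySem.Dict.size d) n (PySem.Dict.size d + 1)
        hnk (by omega) (by omega) (hterm n hnk)
      · intro c hc; exact hval c hc
      · intro m hm hmnone
        exact pvRep0_contains _ m (List.mem_filter.mpr ⟨hm, by simp [hmnone]⟩)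
    have hgood : pvGoodD d ((fun r => (PySem.Dict.items d).foldl pvRelax r)^[PySem.Dict.size d] rep0) := by
      have h0 : pvGoodD d rep0 := by
        refine pvRep0_good d _ ?_
        intro m hm
        have := (List.mem_filter.mp hm).2
        simpa using this
      clear hcont
      induction (PySem.Dict.size d) with
      | zero => exact h0
      | succ m ih =>
        rw [Function.iterate_succ_apply']
        exact pvRelax_fold_good d _ hitems _ ih
    rw [PySem.Dict.contains_eq_isSome_get?] at hcont
    obtain ⟨v, hv⟩ := Option.isSome_iff_exists.mp hcont
    rw [PySem.Dict.getD_of_get?_eq_some _ _ hv]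
    exact pvRepRel_unique d (hgood n v hv) (pvRepA_some d n (hterm n hnk)).2
  have hseq : order.map (fun n => PySem.Dict.getD ((List.range (PySem.Dict.size d)).foldl
        (fun r _ => (PySem.Dict.items d).foldl pvRelax r)
        ((known.filter (fun n => ((PySem.Dict.get? d n).getD none).isNone)).foldl
          (fun r n => PySem.Dict.insert r n n) PySem.Dict.empty)) n "")
      = order.map (fun n => pvRepFun d n) :=
    List.map_congr_left hrepeq
  rw [hseq]
  -- both sides are now (ofList (order.map g)).map (fun k => (k, order.filter (g · == k)))
  have hAfold : order.foldl
      (fun fam node => PySem.Dict.modify fam (pvRepFun d node) [] (fun v => v ++ [node]))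
      PySem.Dict.empty
      = (order.map (fun n => (pvRepFun d n, n))).foldl
          (fun fam p => PySem.Dict.modify fam p.1 [] (fun v => v ++ [p.2])) PySem.Dict.empty := by
    rw [List.foldl_map]
  rw [hAfold]
  set fam := (order.map (fun n => (pvRepFun d n, n))).foldl
      (fun fam p => PySem.Dict.modify fam p.1 [] (fun v => v ++ [p.2])) PySem.Dict.empty with hfam
  have hkeys : PySem.Dict.keys fam = PySem.Set.ofList (order.map (fun n => pvRepFun d n)) := by
    rw [hfam, PySem.Dict.keys_foldl_modify_key, PySem.Dict.keys_empty, PySem.Set.update_nil_left,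
      List.map_map]
    rfl
  have hnodup : (PySem.Dict.keys fam).Nodup := by
    rw [hkeys]; exact PySem.Set.nodup_ofList _
  rw [PySem.Dict.items_eq_map_keys fam hnodup []]
  rw [hkeys]
  rw [PySem.List.dedup_eq_ofList]
  apply List.map_congr_left
  intro k hk
  have hgetD : PySem.Dict.getD fam k [] = order.filter (fun n => pvRepFun d n == k) := by
    rw [hfam, PySem.Dict.getD_foldl_modify_append, PySem.Dict.getD_empty]
    rw [List.nil_append]
    exact pvFilter_map_fst (fun n => pvRepFun d n) k order
  rw [hgetD, pvZip_map_self, pvFilter_map_snd]
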